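-- pv_equiv track=rewrite | github.com/369harshit/DP-problems | ninja_&_his_friends.py | maxChocolates
-- ===== SOURCE A (Python) =====
-- def maxChocolates(matrix):
--     n = len(matrix)        # Number of rows in the matrix
--     m = len(matrix[0])     # Number of columns in the matrix
--
--     # Backtracking function to calculate the maximum chocolates Alice and Bob can collect
--     def collectChocolates(row, colA, colB):
--         # Base case: If Alice or Bob moves out of bounds, return 0 chocolates
--         if colA < 0 or colA >= m or colB < 0 or colB >= m:
--             return 0
--
--         # If Alice and Bob are at the same position, collect chocolates from that cell only once
--         if colA == colB:
--             chocolates = matrix[row][colA]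
--         else:
--             # Otherwise, collect chocolates from both Alice's and Bob's positions
--             chocolates = matrix[row][colA] + matrix[row][colB]
--
--         # If they have reached the last row, return the chocolates collected so far
--         if row == n - 1:
--             return chocolates
--
--         # Variable to keep track of the maximum chocolates they can collect in future moves
--         maxChocolatesCollected = 0
--
--         # Alice can move to the next row in 3 possible directions: down-left, down, or down-right
--         for newColA in [colA - 1, colA, colA + 1]:
--             # Bob can move to the next row in 3 possible directions: down-left, down, or down-right
--             for newColB in [colB - 1, colB, colB + 1]:
--                 # Recursively collect chocolates for all possible combinations of moves for Alice and Bob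
--                 maxChocolatesCollected = max(maxChocolatesCollected,collectChocolates(row + 1, newColA, newColB))  # Recursive call to explore further rows
--
--         # Return the total chocolates collected from the current cell(s) plus the maximum chocolates from future moves
--         return chocolates + maxChocolatesCollected
--
--     # Start the collection from the top row: Alice at (0, 0) and Bob at (0, m-1)
--     return collectChocolates(0, 0, m - 1)
--
-- matrix = [
--     [2, 3, 1, 2],  # Row 1: Alice and Bob start from opposite corners
--     [3, 4, 2, 2],  # Row 2: Possible moves down-left, down, or down-right
--     [5, 6, 3, 5]   # Row 3: Last row where they collect final chocolates
-- ]
-- ===== SOURCE B (Python) =====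
-- def maxChocolates(matrix):
--     m = len(matrix[0])
--     if m == 0:
--         return 0
--     last = matrix[-1]
--     cur = [[last[a] if a == b else last[a] + last[b] for b in range(m)]
--            for a in range(m)]
--     for row in reversed(matrix[:-1]):
--         cur = [[(row[a] if a == b else row[a] + row[b])
--                 + max([cur[na][nb]
--                        for na in (a - 1, a, a + 1) if 0 <= na < m
--                        for nb in (b - 1, b, b + 1) if 0 <= nb < m] + [0])
--                 for b in range(m)] for a in range(m)]
--     return cur[0][m - 1]
-- ===== Notes on version B (the rewrite author's own statement) =====
-- stated objective: faster
-- what changed: Replaces A's exponential 9-way branching recursion over (row, colA, colB) with a bottom-up dynamic program keeping one m*m table of best-from-here values per row.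
import Mathlib
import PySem

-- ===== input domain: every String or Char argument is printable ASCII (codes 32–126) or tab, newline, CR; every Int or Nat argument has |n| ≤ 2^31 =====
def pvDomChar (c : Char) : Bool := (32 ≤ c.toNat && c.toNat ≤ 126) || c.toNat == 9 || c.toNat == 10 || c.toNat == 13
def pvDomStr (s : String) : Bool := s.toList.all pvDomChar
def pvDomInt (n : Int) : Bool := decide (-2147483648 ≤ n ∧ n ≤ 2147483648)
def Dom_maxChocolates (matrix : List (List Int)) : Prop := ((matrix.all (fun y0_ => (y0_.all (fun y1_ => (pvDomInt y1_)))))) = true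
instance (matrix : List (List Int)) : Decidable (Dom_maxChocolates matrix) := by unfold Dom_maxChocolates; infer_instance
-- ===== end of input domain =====

-- B replaces A's exponential two-path backtracking by a bottom-up DP over (colA, colB) per row.

-- ===== PORT A =====
-- matrix[row][col]; Pre_ keeps every accessed index in range, so the default 0 is never used
def pvCellA (r : List Int) (i : Int) : Int := (PySem.List.pyGet? r i).getD 0

-- collectChocolates, with the current row suffix of `matrix` in place of the row index
-- (row = n-1 ⟺ the suffix is a single row; the call row+1 = recursion on the tail)
def pvCollectA (m : Int) (rows : List (List Int)) (colA colB : Int) : Int :=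
  if colA < 0 ∨ m ≤ colA ∨ colB < 0 ∨ m ≤ colB then 0
  else
    match rows with
    | [] => 0   -- unreachable: the Python never calls past the last row
    | r :: rest =>
      let chocolates := if colA = colB then pvCellA r colA else pvCellA r colA + pvCellA r colB
      match rest with
      | [] => chocolates
      | _ :: _ =>
        chocolates +
          [colA - 1, colA, colA + 1].foldl (fun acc na =>
            [colB - 1, colB, colB + 1].foldl (fun acc2 nb =>
              max acc2 (pvCollectA m rest na nb)) acc) 0

def maxChocolates (matrix : List (List Int)) : Int :=
  let m : Int := ((matrix.headD []).length : Int)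
  pvCollectA m matrix 0 (m - 1)

-- ===== PORT B =====
def pvCellB (r : List Int) (a b : Nat) : Int :=
  if a = b then (PySem.List.pyGet? r (a : Int)).getD 0
  else (PySem.List.pyGet? r (a : Int)).getD 0 + (PySem.List.pyGet? r (b : Int)).getD 0

-- the comprehension [cur[na][nb] for na in … if 0<=na<m for nb in … if 0<=nb<m]
def pvNbrVals (m : Nat) (cur : List (List Int)) (a b : Nat) : List Int :=
  (([(a : Int) - 1, (a : Int), (a : Int) + 1].filter
      (fun na => decide (0 ≤ na) && decide (na < (m : Int)))).flatMap
    (fun na => ([(b : Int) - 1, (b : Int), (b : Int) + 1].filter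
        (fun nb => decide (0 ≤ nb) && decide (nb < (m : Int)))).map
      (fun nb => (cur.getD na.toNat []).getD nb.toNat 0)))

def pvBase (m : Nat) (r : List Int) : List (List Int) :=
  (List.range m).map (fun a => (List.range m).map (fun b => pvCellB r a b))

def pvStep (m : Nat) (r : List Int) (cur : List (List Int)) : List (List Int) :=
  (List.range m).map (fun a => (List.range m).map (fun b =>
    pvCellB r a b + (PySem.List.max? (pvNbrVals m cur a b ++ [0]) (fun y => y)).getD 0))

-- the loop `for row in reversed(matrix[:-1]): cur = step(row, cur)` seeded with base(matrix[-1])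
def pvDP (m : Nat) : List (List Int) → List (List Int)
  | [] => []
  | [r] => pvBase m r
  | r :: rest@(_ :: _) => pvStep m r (pvDP m rest)

def maxChocolates_alt (matrix : List (List Int)) : Int :=
  let m : Nat := (matrix.headD []).length
  if m = 0 then 0
  else ((pvDP m matrix).getD 0 []).getD (m - 1) 0

-- ===== PRECONDITION & SPEC =====
-- Pre_ excludes exactly the inputs on which A raises IndexError: the empty matrix
-- (matrix[0]) and matrices with some row shorter than row 0 (column m-1 is read in every row).
def Pre_maxChocolates (matrix : List (List Int)) : Prop :=
  matrix ≠ [] ∧ ∀ r ∈ matrix, (matrix.headD []).length ≤ r.length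
instance (matrix : List (List Int)) : Decidable (Pre_maxChocolates matrix) := by
  unfold Pre_maxChocolates; infer_instance

def pvWitness_maxChocolates : List (List Int) := [[2, 3, 1], [5, 6, 3]]

def Spec_maxChocolates (matrix : List (List Int)) (out : Int) : Prop := out = maxChocolates_alt matrix
instance (matrix : List (List Int)) (out : Int) : Decidable (Spec_maxChocolates matrix out) := by unfold Spec_maxChocolates; infer_instance

-- ===== CLAIM (what is proved, stated in full; the proofs are below) =====
def Claim_equal_maxChocolates : Prop := ∀ (matrix : List (List Int)), Dom_maxChocolates matrix → Pre_maxChocolates matrix → Spec_maxChocolates matrix (maxChocolates matrix)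

-- ===== LEMMAS AND PROOFS =====

theorem pvCollectA_oob (m : Int) (rows : List (List Int)) (colA colB : Int)
    (h : colA < 0 ∨ m ≤ colA ∨ colB < 0 ∨ m ≤ colB) :
    pvCollectA m rows colA colB = 0 := by
  unfold pvCollectA; simp [h]

theorem pvCollectA_single (m : Int) (r : List Int) (colA colB : Int)
    (h : ¬(colA < 0 ∨ m ≤ colA ∨ colB < 0 ∨ m ≤ colB)) :
    pvCollectA m [r] colA colB =
      (if colA = colB then pvCellA r colA else pvCellA r colA + pvCellA r colB) := by
  unfold pvCollectA; simp [h]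

theorem pvCollectA_cons2 (m : Int) (r r2 : List Int) (rest2 : List (List Int)) (colA colB : Int)
    (h : ¬(colA < 0 ∨ m ≤ colA ∨ colB < 0 ∨ m ≤ colB)) :
    pvCollectA m (r :: r2 :: rest2) colA colB =
      (if colA = colB then pvCellA r colA else pvCellA r colA + pvCellA r colB) +
        [colA - 1, colA, colA + 1].foldl (fun acc na =>
          [colB - 1, colB, colB + 1].foldl (fun acc2 nb =>
            max acc2 (pvCollectA m (r2 :: rest2) na nb)) acc) 0 := by
  rw [pvCollectA]; simp [h]

theorem pvCellB_eq (r : List Int) (a b : Nat) :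
    pvCellB r a b =
      (if (a : Int) = (b : Int) then pvCellA r (a : Int)
       else pvCellA r (a : Int) + pvCellA r (b : Int)) := by
  simp [pvCellA, pvCellB, Nat.cast_inj]

theorem getD_map_range' {α : Type} (m : Nat) (f : Nat → α) (a : Nat) (d : α) (ha : a < m) :
    ((List.range m).map f).getD a d = f a := by
  simp [List.getD, ha]

theorem foldl_max_init (l : List Int) : ∀ a b : Int,
    l.foldl max (max a b) = max a (l.foldl max b) := by
  induction l with
  | nil => intro a b; simp
  | cons x t ih =>
    intro a b
    simp only [List.foldl_cons]
    rw [max_assoc, ih]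

theorem max?_append_zero (l : List Int) :
    (PySem.List.max? (l ++ [0]) (fun y => y)).getD 0 = l.foldl max 0 := by
  cases l with
  | nil => decide
  | cons x t =>
    rw [List.cons_append, PySem.List.max?_id_cons, Option.getD_some, List.foldl_append]
    simp only [List.foldl_cons, List.foldl_nil]
    have h := foldl_max_init t 0 x
    rw [max_comm 0 x] at h ⊢
    omega

theorem foldl_max_zeros (l : List Int) : ∀ init : Int, 0 ≤ init →
    (l.map (fun _ => (0 : Int))).foldl max init = init := by
  induction l with
  | nil => intro init _; simp
  | cons x t ih =>
    intro init h
    simp only [List.map_cons, List.foldl_cons]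
    rw [max_eq_left h]
    exact ih init h

theorem filter_map_foldl_max (q : Int → Bool) (g : Int → Int) :
    ∀ (l : List Int) (init : Int), 0 ≤ init →
    ((l.filter q).map g).foldl max init
      = (l.map (fun y => if q y = true then g y else 0)).foldl max init := by
  intro l
  induction l with
  | nil => intro init _; simp
  | cons y t ih =>
    intro init h
    cases hq : q y with
    | true =>
      simp only [List.filter_cons, hq, if_pos, List.map_cons, List.foldl_cons]
      exact ih (max init (g y)) (le_trans h (le_max_left _ _))
    | false =>
      simp only [List.filter_cons, hq, List.map_cons, List.foldl_cons]
      simp only [Bool.false_eq_true, if_false]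
      rw [max_eq_left h]
      exact ih init h

theorem filter_flatMap_foldl_max (p q : Int → Bool) (f : Int → Int → Int) :
    ∀ (l1 l2 : List Int) (init : Int), 0 ≤ init →
    ((l1.filter p).flatMap (fun x => (l2.filter q).map (f x))).foldl max init
      = (l1.flatMap (fun x => l2.map (fun y => if (p x && q y) = true then f x y else 0))).foldl max init := by
  intro l1
  induction l1 with
  | nil => intro l2 init _; simp
  | cons x t ih =>
    intro l2 init h
    cases hp : p x with
    | true =>
      simp only [List.filter_cons, hp, if_pos, List.flatMap_cons, List.foldl_append,
        Bool.true_and]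
      rw [filter_map_foldl_max q (f x) l2 init h]
      exact ih l2 _ (le_trans h ((PySem.List.le_foldl_max _ _).1))
    | false =>
      simp only [List.filter_cons, hp, List.flatMap_cons, List.foldl_append, Bool.false_and,
        Bool.false_eq_true, if_false]
      rw [foldl_max_zeros l2 init h]
      exact ih l2 init h

-- the main invariant: B's DP table holds A's backtracking values
theorem dp_eq (m : Nat) :
    ∀ (rows : List (List Int)) (a b : Nat), a < m → b < m →
    ((pvDP m rows).getD a []).getD b 0 = pvCollectA (m : Int) rows (a : Int) (b : Int) := by
  intro rows
  induction rows with
  | nil =>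
    intro a b _ _
    rw [pvCollectA]
    simp [pvDP]
  | cons r rest ih =>
    intro a b ha hb
    have hguard : ¬((a : Int) < 0 ∨ (m : Int) ≤ (a : Int) ∨ (b : Int) < 0 ∨ (m : Int) ≤ (b : Int)) := by
      push Not; omega
    cases rest with
    | nil =>
      rw [pvCollectA_single _ _ _ _ hguard]
      simp only [pvDP, pvBase]
      rw [getD_map_range' m _ a [] ha, getD_map_range' m _ b 0 hb]
      exact pvCellB_eq r a b
    | cons r2 rest2 =>
      rw [pvCollectA_cons2 _ _ _ _ _ _ hguard]
      simp only [pvDP, pvStep]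
      rw [getD_map_range' m _ a [] ha, getD_map_range' m _ b _ hb]
      rw [max?_append_zero]
      have hpt : ∀ na nb : Int,
          (if ((decide (0 ≤ na) && decide (na < (m : Int))) &&
               (decide (0 ≤ nb) && decide (nb < (m : Int)))) = true
           then (((pvDP m (r2 :: rest2)).getD na.toNat []).getD nb.toNat 0)
           else 0) = pvCollectA (m : Int) (r2 :: rest2) na nb := by
        intro na nb
        by_cases hin : (0 ≤ na ∧ na < (m : Int)) ∧ (0 ≤ nb ∧ nb < (m : Int))
        · obtain ⟨⟨hna0, hnam⟩, hnb0, hnbm⟩ := hin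
          have e1 : ((na.toNat : Int)) = na := Int.toNat_of_nonneg hna0
          have e2 : ((nb.toNat : Int)) = nb := Int.toNat_of_nonneg hnb0
          have := ih na.toNat nb.toNat (by omega) (by omega)
          rw [e1, e2] at this
          simp only [hna0, hnam, hnb0, hnbm, decide_true, Bool.and_self, if_pos]
          simpa using this
        · have hoob : na < 0 ∨ (m : Int) ≤ na ∨ nb < 0 ∨ (m : Int) ≤ nb := by
            by_contra hc; push Not at hc; exact hin ⟨⟨hc.1, hc.2.1⟩, hc.2.2.1, hc.2.2.2⟩
          rw [pvCollectA_oob _ _ _ _ hoob]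
          rcases hoob with h | h | h | h <;> simp [h]
      congr 1
      · exact pvCellB_eq r a b
      · unfold pvNbrVals
        rw [filter_flatMap_foldl_max _ _ _ _ _ 0 le_rfl]
        simp only [hpt]
        simp [List.flatMap_cons, List.foldl_cons]

-- ===== VERDICT (by name: the statement is the Claim_ definition above) =====
theorem maxChocolates_spec : Claim_equal_maxChocolates := by
  intro matrix _ _
  unfold Spec_maxChocolates maxChocolates maxChocolates_alt
  by_cases hm : (matrix.headD []).length = 0
  · rw [if_pos hm, hm]
    exact pvCollectA_oob _ _ _ _ (by norm_num)
  · rw [if_neg hm]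
    have h := dp_eq (matrix.headD []).length matrix 0 ((matrix.headD []).length - 1)
      (by omega) (by omega)
    have e : (((matrix.headD []).length - 1 : Nat) : Int) = ((matrix.headD []).length : Int) - 1 := by
      omega
    rw [h, e]
    norm_num
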